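-- pv_equiv track=rewrite | github.com/less-lab-uva/SceneFlowLang | SymbolicProperty.py | valid_mapping
-- ===== SOURCE A (Python) =====
-- def valid_mapping(node_mapping_list):
--     seen_nodes = set()
--     for node in node_mapping_list:
--         if node not in seen_nodes:
--             seen_nodes.add(node)
--         elif node is not None:
--             # we have a duplicate of a non-null value, that's not valid
--             return False
--     if len(seen_nodes) == 1 and next(iter(seen_nodes)) is None:
--         # the set is all None, that is not valid
--         return False
--     return True
-- ===== SOURCE B (Python) =====
-- def valid_mapping(node_mapping_list):
--     non_null = sorted(n for n in node_mapping_list if n is not None)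
--     for a, b in zip(non_null, non_null[1:]):
--         if a == b:
--             return False
--     return bool(non_null) or not node_mapping_list
-- ===== Notes on version B (the rewrite author's own statement) =====
-- stated objective: alternative
-- what changed: Replaces A's hash-set single pass (early return on a seen non-None duplicate, final one-element-set check) with a sort-based algorithm: sort the non-None values and scan adjacent pairs for equality, then decide the all-None case by 'bool(non_null) or not node_mapping_list'.
import Mathlib
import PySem

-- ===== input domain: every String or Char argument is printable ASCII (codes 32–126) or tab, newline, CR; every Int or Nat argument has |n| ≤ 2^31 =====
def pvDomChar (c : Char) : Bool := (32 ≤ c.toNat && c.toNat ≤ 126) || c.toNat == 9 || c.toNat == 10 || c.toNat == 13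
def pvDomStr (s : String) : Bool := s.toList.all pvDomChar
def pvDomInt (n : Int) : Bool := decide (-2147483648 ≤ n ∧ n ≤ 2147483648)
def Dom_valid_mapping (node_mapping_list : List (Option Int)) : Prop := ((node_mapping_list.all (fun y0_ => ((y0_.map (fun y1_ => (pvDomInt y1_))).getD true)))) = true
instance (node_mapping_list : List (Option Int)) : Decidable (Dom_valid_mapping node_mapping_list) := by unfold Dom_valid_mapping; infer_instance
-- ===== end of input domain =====

-- B replaces A's hash-set single pass with a sort-based algorithm: sort the non-None
-- values and scan adjacent pairs for a duplicate (objective: alternative).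

-- ===== PORT A =====
-- the for-loop with early return; at the end of the list, the final all-None check
-- (a one-element set's iteration order is determined, so next(iter(seen)) is its head)
def validLoopA (seen : PySem.Set (Option Int)) : List (Option Int) → Bool
  | [] =>
      if PySem.Set.len seen == 1 && seen.head? == some none then false else true
  | node :: rest =>
      if !(PySem.Set.contains seen node) then validLoopA (PySem.Set.add seen node) rest
      else if node ≠ none then false
      else validLoopA seen rest

def valid_mapping (node_mapping_list : List (Option Int)) : Bool :=
  validLoopA PySem.Set.empty node_mapping_list

-- ===== PORT B =====
-- the 'for a, b in zip(non_null, non_null[1:])' loop with early return on a == b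
def noAdjDup : List (Int × Int) → Bool
  | [] => true
  | (a, b) :: rest => if a == b then false else noAdjDup rest

def valid_mapping_alt (node_mapping_list : List (Option Int)) : Bool :=
  let non_null := PySem.List.sorted (node_mapping_list.filterMap (fun n => n)) (fun x => x) false
  if noAdjDup (non_null.zip (PySem.List.slice non_null (some 1) none)) then
    !non_null.isEmpty || node_mapping_list.isEmpty
  else false

-- ===== PRECONDITION & SPEC =====
def Spec_valid_mapping (node_mapping_list : List (Option Int)) (out : Bool) : Prop := out = valid_mapping_alt node_mapping_list
instance (node_mapping_list : List (Option Int)) (out : Bool) : Decidable (Spec_valid_mapping node_mapping_list out) := by unfold Spec_valid_mapping; infer_instance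

-- ===== CLAIM (what is proved, stated in full; the proofs are below) =====
def Claim_equal_valid_mapping : Prop := ∀ (node_mapping_list : List (Option Int)), Dom_valid_mapping node_mapping_list → Spec_valid_mapping node_mapping_list (valid_mapping node_mapping_list)

-- ===== LEMMAS AND PROOFS =====

-- A's loop characterised: it returns true iff no non-None element (past seen) repeats,
-- in which case the result is the final check on the fully-built set
theorem loopA_char (xs : List (Option Int)) (seen : PySem.Set (Option Int)) :
    validLoopA seen xs =
      if (∀ n ∈ xs, n ≠ none → n ∉ seen) ∧ (xs.filter (fun n => n != none)).Nodup then
        validLoopA (PySem.Set.update seen xs) []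
      else false := by
  induction xs generalizing seen with
  | nil => simp [PySem.Set.update_nil]
  | cons x r ih =>
    rw [PySem.Set.update_cons]
    by_cases hx : x ∈ seen
    · by_cases hxn : x = none
      · subst hxn
        have h1 : validLoopA seen (none :: r) = validLoopA seen r := by
          simp [validLoopA, hx]
        rw [h1, ih seen, PySem.Set.add_of_mem hx]
        have hiff : ((∀ n ∈ r, n ≠ none → n ∉ seen) ∧ (List.filter (fun n => n != none) r).Nodup)
            ↔ ((∀ n ∈ (none :: r : List (Option Int)), n ≠ none → n ∉ seen) ∧ (List.filter (fun n => n != none) ((none : Option Int) :: r)).Nodup) := by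
          simp only [List.mem_cons, List.filter_cons]
          aesop
        simp only [hiff]
      · have h1 : validLoopA seen (x :: r) = false := by
          simp [validLoopA, hx, hxn]
        rw [h1, if_neg]
        rintro ⟨h1, _⟩
        exact h1 x (List.mem_cons_self) hxn hx
    · have h1 : validLoopA seen (x :: r) = validLoopA (PySem.Set.add seen x) r := by
        simp [validLoopA, hx]
      rw [h1, ih]
      have hiff : ((∀ n ∈ r, n ≠ none → n ∉ PySem.Set.add seen x) ∧ (List.filter (fun n => n != none) r).Nodup)
          ↔ ((∀ n ∈ (x :: r), n ≠ none → n ∉ seen) ∧ (List.filter (fun n => n != none) (x :: r)).Nodup) := by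
        simp only [List.mem_cons, List.filter_cons, PySem.Set.mem_add]
        by_cases hxn : x = none
        · subst hxn; simp; aesop
        · simp [hxn]
          constructor
          · rintro ⟨h1, h2⟩
            refine ⟨⟨hx, fun n hn hne => (h1 n hn hne).1⟩, ?_, h2⟩
            intro hmem
            exact ((h1 x hmem hxn).2 rfl : False).elim
          · rintro ⟨⟨-, h1⟩, hnx, h2⟩
            refine ⟨fun n hn hne => ⟨h1 n hn hne, fun he => ?_⟩, h2⟩
            subst he; exact hnx hn
      simp only [hiff]

theorem update_empty (xs : List (Option Int)) :
    PySem.Set.update PySem.Set.empty xs = PySem.Set.ofList xs := by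
  rw [PySem.Set.ofList_eq_foldl]
  rfl

theorem discard_eq_filter (s : PySem.Set (Option Int)) (x : Option Int) :
    PySem.Set.discard s x = List.filter (fun y => !(y == x)) s := by
  simp [PySem.Set.discard]

-- the set of an all-None non-empty list is exactly [none]
theorem ofList_all_none (xs : List (Option Int)) (hne : xs ≠ [])
    (hall : ∀ n ∈ xs, n = (none : Option Int)) : PySem.Set.ofList xs = [none] := by
  induction xs with
  | nil => exact absurd rfl hne
  | cons x r ih =>
    have hx : x = none := hall x (List.mem_cons_self)
    subst hx
    rw [PySem.Set.ofList_cons, discard_eq_filter]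
    rcases r with _ | ⟨y, t⟩
    · simp [PySem.Set.ofList_nil]
    · rw [ih (by simp) (fun n hn => hall n (List.mem_cons_of_mem _ hn))]
      simp

-- A's final check equals 'some non-None value exists, or the list is empty'
theorem final_check (xs : List (Option Int)) :
    validLoopA (PySem.Set.ofList xs) [] = (!(xs.filterMap (fun n => n)).isEmpty || xs.isEmpty) := by
  rcases xs with _ | ⟨y, t⟩
  · simp [validLoopA, PySem.Set.ofList_nil, PySem.Set.len]
  · by_cases hfm : ((y :: t).filterMap (fun n : Option Int => n)) = []
    · have hall : ∀ n ∈ (y :: t), n = (none : Option Int) := by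
        intro n hn
        rcases n with _ | v
        · rfl
        · exfalso
          have hv : v ∈ (y :: t).filterMap (fun n : Option Int => n) :=
            List.mem_filterMap.mpr ⟨some v, hn, rfl⟩
          rw [hfm] at hv
          simp at hv
      rw [ofList_all_none (y :: t) (by simp) hall, hfm]
      simp [validLoopA, PySem.Set.len]
    · obtain ⟨m, hm⟩ := List.exists_mem_of_ne_nil _ hfm
      have hmx : (some m : Option Int) ∈ (y :: t) := by
        obtain ⟨a, ha, hae⟩ := List.mem_filterMap.mp hm
        exact hae ▸ ha
      have hne : PySem.Set.ofList (y :: t) ≠ [none] := by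
        intro he
        have hmem : (some m : Option Int) ∈ PySem.Set.ofList (y :: t) :=
          (PySem.Set.mem_ofList ..).2 hmx
        rw [he] at hmem
        simp at hmem
      have hie : ((y :: t).filterMap (fun n : Option Int => n)).isEmpty = false := by
        rw [Bool.eq_false_iff]
        intro h
        exact hfm (List.isEmpty_iff.mp h)
      rw [hie]
      simp only [validLoopA]
      rw [if_neg]
      · simp
      · intro hc
        rw [Bool.and_eq_true, beq_iff_eq, beq_iff_eq, PySem.Set.len] at hc
        apply hne
        rcases hs : PySem.Set.ofList (y :: t) with _ | ⟨a, s⟩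
        · rw [hs] at hc; simp at hc
        · rw [hs] at hc
          obtain ⟨h1, h2⟩ := hc
          simp at h2
          subst h2
          have hsnil : s = [] := by
            simp only [List.length_cons] at h1
            exact List.length_eq_zero_iff.1 (by omega)
          rw [hsnil]

-- B's loop over zip(l, l[1:]) on a weakly increasing list detects any duplicate:
-- a repeated value in a sorted list must occur in adjacent positions
theorem sorted_nodup_iff (l : List Int) (hs : l.Pairwise (· ≤ ·)) :
    (noAdjDup (l.zip l.tail) = true) ↔ l.Nodup := by
  induction l with
  | nil => simp [noAdjDup]
  | cons a t ih =>
    rcases t with _ | ⟨b, t2⟩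
    · simp [noAdjDup]
    · rw [List.pairwise_cons] at hs
      obtain ⟨ha, hbt⟩ := hs
      by_cases hab : a = b
      · subst hab
        simp [noAdjDup, List.zip_cons_cons]
      · have h1 : noAdjDup ((a :: b :: t2).zip (a :: b :: t2).tail)
            = noAdjDup ((b :: t2).zip (b :: t2).tail) := by
          simp [noAdjDup, List.zip_cons_cons, hab]
        rw [h1, ih hbt]
        have hnotmem : a ∉ (b :: t2) := by
          intro hmem
          rcases List.mem_cons.mp hmem with h | h
          · exact hab h
          · have h2 : b ≤ a := (List.pairwise_cons.mp hbt).1 a h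
            have h3 : a ≤ b := ha b (List.mem_cons_self)
            exact hab (le_antisymm h3 h2)
        simp [List.nodup_cons, hnotmem]

-- the non-None options of xs are exactly 'some' of its filterMap values
theorem filter_eq_map_some (xs : List (Option Int)) :
    xs.filter (fun n => n != none) = (xs.filterMap (fun n : Option Int => n)).map some := by
  induction xs with
  | nil => simp
  | cons x t ih =>
    rcases x with _ | v
    · simpa using ih
    · simpa using ih

theorem nodup_filter_iff (xs : List (Option Int)) :
    (xs.filter (fun n => n != none)).Nodup ↔ (xs.filterMap (fun n : Option Int => n)).Nodup := by
  rw [filter_eq_map_some]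
  exact List.nodup_map_iff (Option.some_injective _)

-- ===== VERDICT (by name: the statement is the Claim_ definition above) =====
theorem valid_mapping_spec : Claim_equal_valid_mapping := by
  intro xs _
  unfold Spec_valid_mapping valid_mapping
  simp only [valid_mapping_alt]
  rw [loopA_char, update_empty, PySem.List.slice_from_one]
  have hpw : (PySem.List.sorted (xs.filterMap (fun n : Option Int => n)) (fun x => x) false).Pairwise (· ≤ ·) := by
    simpa using PySem.List.sorted_pairwise (xs.filterMap id) (fun x : Int => x)
  have hcond : (noAdjDup ((PySem.List.sorted (xs.filterMap (fun n : Option Int => n)) (fun x => x) false).zip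
        (PySem.List.sorted (xs.filterMap (fun n : Option Int => n)) (fun x => x) false).tail) = true)
      ↔ (xs.filter (fun n => n != none)).Nodup := by
    rw [sorted_nodup_iff _ hpw, (PySem.List.sorted_perm ..).nodup_iff, ← nodup_filter_iff]
  by_cases hdup : (xs.filter (fun n => n != none)).Nodup
  · rw [if_pos ⟨fun n _ _ => by simp [PySem.Set.empty], hdup⟩, if_pos (hcond.mpr hdup), final_check]
    have hie : (PySem.List.sorted (xs.filterMap (fun n : Option Int => n)) (fun x => x) false).isEmpty
        = (xs.filterMap (fun n : Option Int => n)).isEmpty := by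
      rw [Bool.eq_iff_iff]
      simp [PySem.List.sorted_eq_nil_iff]
    rw [hie]
  · rw [if_neg (fun h => hdup h.2), if_neg (fun h => hdup (hcond.mp h))]
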